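/- GENERATED by c/gen_decode.py: decode facts of the image, one per distinct instruction byte string. -/
import UserX.DecodeImage

#decode_all Vorbis.Dec
  "0f28d3"  -- movaps xmm2,xmm3
  "0f845f010000"  -- je 113d9d
  "0f84fdfeffff"  -- je 1119bc
  "0f88a8fcffff"  -- js 110c6a
  "0f8f6dfcffff"  -- jg 10576f
  "0fb6c3"  -- movzx eax,bl
  "39c2"  -- cmp edx,eax
  "410fb6441f21"  -- movzx eax,BYTE PTR [r15+rbx*1+0x21]
  "4157"  -- push r15
  "418907"  -- mov DWORD PTR [r15],eax
  "418b6d00"  -- mov ebp,DWORD PTR [r13+0x0]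
  "41c7850800c00000f2f2f2"  -- mov DWORD PTR [r13+0xc00008],0xf2f2f200
  "4401f5"  -- add ebp,r14d
  "4439e8"  -- cmp eax,r13d
  "44897304"  -- mov DWORD PTR [rbx+0x4],r14d
  "4489f9"  -- mov ecx,r15d
  "448bad38ffffff"  -- mov r13d,DWORD PTR [rbp-0xc8]
  "4539ee"  -- cmp r14d,r13d
  "458b3e"  -- mov r15d,DWORD PTR [r14]
  "48034810"  -- add rcx,QWORD PTR [rax+0x10]
  "48638548ffffff"  -- movsxd rax,DWORD PTR [rbp-0xb8]
  "48837f7000"  -- cmp QWORD PTR [rdi+0x70],0x0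
  "4889442418"  -- mov QWORD PTR [rsp+0x18],rax
  "4889ea"  -- mov rdx,rbp
  "488b7520"  -- mov rsi,QWORD PTR [rbp+0x20]
  "488d2c82"  -- lea rbp,[rdx+rax*4]
  "488d7b54"  -- lea rdi,[rbx+0x54]
  "488d98a0000000"  -- lea rbx,[rax+0xa0]
  "488dbc2b46030000"  -- lea rdi,[rbx+rbp*1+0x346]
  "48c1e202"  -- shl rdx,0x2
  "4901c7"  -- add r15,rax
  "4963fd"  -- movsxd rdi,r13d
  "498b4500"  -- mov rax,QWORD PTR [r13+0x0]
  "498d7e0c"  -- lea rdi,[r14+0xc]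
  "49c1e503"  -- shl r13,0x3
  "4a8dbceb88050000"  -- lea rdi,[rbx+r13*8+0x588]
  "4c63b538ffffff"  -- movsxd r14,DWORD PTR [rbp-0xc8]
  "4c89ee"  -- mov rsi,r13
  "4c8d2440"  -- lea r12,[rax+rax*2]
  "4d0fbfe4"  -- movsx r12,r12w
  "4d8d74246c"  -- lea r14,[r12+0x6c]
  "660f2fc5"  -- comisd xmm0,xmm5
  "66410f7ed5"  -- movd r13d,xmm2
  "66f7c30080"  -- test bx,0x8000
  "7439"  -- je 111b94
  "7526"  -- jne 10d71c
  "78b3"  -- js 108ab9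
  "7e43"  -- jle 102257
  "80bbd406000000"  -- cmp BYTE PTR [rbx+0x6d4],0x0
  "83c00f"  -- add eax,0xf
  "89442404"  -- mov DWORD PTR [rsp+0x4],eax
  "898528ffffff"  -- mov DWORD PTR [rbp-0xd8],eax
  "8b1b"  -- mov ebx,DWORD PTR [rbx]
  "8b6c2440"  -- mov ebp,DWORD PTR [rsp+0x40]
  "8d1403"  -- lea edx,[rbx+rax*1]
  "bb02fcffff"  -- mov ebx,0xfffffc02
  "c1ff19"  -- sar edi,0x19
  "c7830c00c000f2f20000"  -- mov DWORD PTR [rbx+0xc0000c],0xf2f2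
  "e801fcffff"  -- call 103200
  "e80bfeffff"  -- call 107500
  "e816c9ffff"  -- call 10d5c0
  "e81f6fffff"  -- call 10d1c0
  "e829cafeff"  -- call 1008e0
  "e831fdffff"  -- call 104c60
  "e83cecfeff"  -- call 100720
  "e847e7feff"  -- call 103d00
  "e852a5ffff"  -- call 100640
  "e85eb0feff"  -- call 1003c0
  "e86b51ffff"  -- call 100640
  "e876c4ffff"  -- call 100800
  "e881a5ffff"  -- call 100640
  "e88cf1feff"  -- call 1003c0
  "e89610ffff"  -- call 104d40
  "e8a086ffff"  -- call 100720
  "e8ab6fffff"  -- call 100640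
  "e8b3f9ffff"  -- call 103f80
  "e8be8effff"  -- call 100800
  "e8c8b9feff"  -- call 100640
  "e8d2bbfeff"  -- call 100640
  "e8dcadfeff"  -- call 1003c0
  "e8e690ffff"  -- call 100800
  "e8ee8dffff"  -- call 100800
  "e8f96cffff"  -- call 102dc0
  "e91cffffff"  -- jmp 10f409
  "e964020000"  -- jmp 10971c
  "e9b7000000"  -- jmp 1093a2
  "eb06"  -- jmp 100e6e
  "eb9d"  -- jmp 10d775
  "ebfb"  -- jmp 1016e6
  "f20f59058e460100"  -- mulsd xmm0,QWORD PTR [rip+0x1468e]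
  "f20f5e1de0e10100"  -- divsd xmm3,QWORD PTR [rip+0x1e1e0]
  "f30f105c2404"  -- movss xmm3,DWORD PTR [rsp+0x4]
  "f30f107db8"  -- movss xmm7,DWORD PTR [rbp-0x48]
  "f30f115be8"  -- movss DWORD PTR [rbx-0x18],xmm3
  "f30f2ac3"  -- cvtsi2ss xmm0,ebx
  "f30f5933"  -- mulss xmm6,DWORD PTR [rbx]
  "f30f5c75ec"  -- subss xmm6,DWORD PTR [rbp-0x14]
  "f3410f106c2408"  -- movss xmm5,DWORD PTR [r12+0x8]
  "f7d9"  -- neg ecx
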